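-- pv_equiv track=rewrite | github.com/dantrim/danny_advents_of_code | 2020/python/day_06/day_06.py | counts_for_each_response
-- ===== SOURCE A (Python) =====
-- def counts_for_each_response(group_responses: list) -> list:
--     """
--     Count the number of occurrences of each of the unique responses within a group.
--
--     Args:
--         group_responses [list] : A list of of lists. Each sub-list contains each
--             groups' person's responses.
--
--     Returns:
--         list of dict
--     """
--
--     group_counts = []
--     uniques = unique_responses(group_responses)
--     for igroup, group in enumerate(group_responses):
--         counts = {}
--         for unique in uniques[igroup]:
--             counts[unique] = "".join(group).count(unique)
--         group_counts.append(counts)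
--     return group_counts
--
-- def unique_responses(group_responses: list) -> list:
--     """
--     From the list of group responses, pick out the unique responses.
--
--     Args:
--         group_responses [list] : A list of of lists. Each sub-list contains each
--             groups' person's responses.
--
--     Returns:
--         list [str] : A list of lists, with duplicate responses removed from the input.
--
--     """
--
--     out = [sorted(list(set(list("".join(g))))) for g in group_responses]
--     return out
-- ===== SOURCE B (Python) =====
-- def counts_for_each_response(group_responses: list) -> list:
--     """Sort each group's joined responses once, then read off run lengths."""
--     result = []
--     for group in group_responses:
--         chars = sorted("".join(group))
--         counts = {}
--         i = 0
--         n = len(chars)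
--         while i < n:
--             j = i
--             while j < n and chars[j] == chars[i]:
--                 j += 1
--             counts[chars[i]] = j - i
--             i = j
--         result.append(counts)
--     return result
-- ===== Notes on version B (the rewrite author's own statement) =====
-- stated objective: alternative
-- what changed: Instead of A's per-group unique-set pass followed by a full '.count' rescan of the joined string for each unique character, B sorts the joined characters once and reads the counts off as run lengths in a single left-to-right pass.
import Mathlib
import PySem

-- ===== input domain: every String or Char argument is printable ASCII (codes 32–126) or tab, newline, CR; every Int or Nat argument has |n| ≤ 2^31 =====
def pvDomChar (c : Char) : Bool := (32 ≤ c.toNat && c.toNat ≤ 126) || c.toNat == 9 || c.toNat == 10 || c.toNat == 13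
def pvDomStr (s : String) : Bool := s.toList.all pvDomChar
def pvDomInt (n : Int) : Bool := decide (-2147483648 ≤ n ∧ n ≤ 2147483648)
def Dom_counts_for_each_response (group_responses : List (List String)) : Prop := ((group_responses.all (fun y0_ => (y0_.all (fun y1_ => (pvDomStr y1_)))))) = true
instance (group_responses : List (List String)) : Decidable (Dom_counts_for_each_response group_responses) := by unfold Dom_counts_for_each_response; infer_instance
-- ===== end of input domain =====

-- B re-implements the per-group counting: sort the joined responses once and read off run
-- lengths in a single pass, instead of A's sorted-unique pass with a '.count' rescan per unique char.

-- ===== PORT A =====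
-- list("".join(g)) : the group's responses joined and read as a char list
def pvJoin (g : List String) : List Char := PySem.Chars.join [] (g.map String.toList)

def counts_for_each_response (group_responses : List (List String)) : List (List (String × Int)) :=
  -- uniques = [sorted(list(set(list("".join(g))))) for g in group_responses]
  let uniques := group_responses.map (fun g =>
    PySem.List.sorted (PySem.Set.ofList (pvJoin g)) (fun x => x))
  -- for igroup, group in enumerate(group_responses): counts = {}; for unique in uniques[igroup]: ...
  -- uniques[igroup] is always in range (uniques has the same length), so pyGetD is exact here
  (PySem.List.enumerate group_responses).foldl
    (fun group_counts p =>
      group_counts ++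
        [((PySem.List.pyGetD uniques p.1 []).foldl
            (fun counts u =>
              counts.insert (String.ofList [u]) ((PySem.Chars.count (pvJoin p.2) [u] : Int)))
            (PySem.Dict.empty : PySem.Dict String Int)).items])
    []

-- ===== PORT B =====
-- Source B's inner while loop: at position i, advance j over the run of chars[i], record
-- counts[chars[i]] = j - i, continue at j.  The dict's keys are fresh and strictly increasing,
-- so the dict is exactly this list of pairs in insertion order.
def pvRunsB : List Char → List (String × Int)
  | [] => []
  | c :: rest =>
    (String.ofList [c], (1 + (rest.takeWhile (fun d => d == c)).length : Int)) ::
      pvRunsB (rest.dropWhile (fun d => d == c))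
termination_by l => l.length
decreasing_by
  exact Nat.lt_succ_of_le (List.length_dropWhile_le _ _)

def counts_for_each_response_alt (group_responses : List (List String)) : List (List (String × Int)) :=
  group_responses.map (fun group => pvRunsB (PySem.List.sorted (pvJoin group) (fun x => x)))


-- ===== PRECONDITION & SPEC =====
def Spec_counts_for_each_response (group_responses : List (List String)) (out : List (List (String × Int))) : Prop := out = counts_for_each_response_alt group_responses
instance (group_responses : List (List String)) (out : List (List (String × Int))) : Decidable (Spec_counts_for_each_response group_responses out) := by unfold Spec_counts_for_each_response; infer_instance

-- ===== CLAIM (what is proved, stated in full; the proofs are below) =====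
def Claim_equal_counts_for_each_response : Prop := ∀ (group_responses : List (List String)), Dom_counts_for_each_response group_responses → Spec_counts_for_each_response group_responses (counts_for_each_response group_responses)

-- ===== LEMMAS AND PROOFS =====

-- str.count of a single character is List.count on the characters
theorem pv_count_go (c : Char) : ∀ (s : List Char) (acc : Nat),
    PySem.Chars.count.go [c] s.length s acc = acc + s.count c := by
  intro s
  induction s with
  | nil => intro acc; simp [PySem.Chars.count.go]
  | cons h t ih =>
    intro acc
    by_cases hc : c = h
    · subst hc
      simpa [PySem.Chars.count.go, List.count_cons, Nat.add_comm, Nat.add_assoc, Nat.add_left_comm]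
        using ih (acc + 1)
    · simp [PySem.Chars.count.go, List.isPrefixOf, hc, Ne.symm hc, ih acc]

theorem pv_count_singleton (s : List Char) (c : Char) :
    PySem.Chars.count s [c] = s.count c := by
  simpa [PySem.Chars.count] using pv_count_go c s 0

-- the distinct keys of a sorted char list, in order of first occurrence (mirrors pvRunsB)
def pvKeys : List Char → List Char
  | [] => []
  | c :: rest => c :: pvKeys (rest.dropWhile (fun d => d == c))
termination_by l => l.length
decreasing_by
  exact Nat.lt_succ_of_le (List.length_dropWhile_le _ _)

theorem pv_lt_of_mem_dropWhile (c : Char) : ∀ (rest : List Char),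
    rest.Pairwise (· ≤ ·) → (∀ y ∈ rest, c ≤ y) →
    ∀ x ∈ rest.dropWhile (fun d => d == c), c < x := by
  intro rest
  induction rest with
  | nil => simp
  | cons a as ih =>
    intro hp hb x hx
    by_cases ha : a = c
    · subst ha
      simp only [List.dropWhile_cons, beq_self_eq_true] at hx
      exact ih hp.of_cons (fun y hy => hb y (List.mem_cons_of_mem _ hy)) x hx
    · have hac : c < a := lt_of_le_of_ne (hb a (List.mem_cons_self)) (Ne.symm ha)
      simp only [List.dropWhile_cons, beq_iff_eq, if_neg ha] at hx
      rcases List.mem_cons.mp hx with h | h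
      · exact h ▸ hac
      · exact lt_of_lt_of_le hac ((List.pairwise_cons.mp hp).1 x h)

theorem pv_mem_pvKeys : ∀ (l : List Char), l.Pairwise (· ≤ ·) →
    ∀ x, x ∈ pvKeys l ↔ x ∈ l := by
  intro l
  induction l using pvKeys.induct with
  | case1 => simp [pvKeys]
  | case2 c rest ih =>
    intro hp x
    have hdrop : (rest.dropWhile (fun d => d == c)).Pairwise (· ≤ ·) :=
      hp.of_cons.sublist (List.dropWhile_sublist _)
    rw [pvKeys]
    constructor
    · intro hx
      rcases List.mem_cons.mp hx with h | h
      · exact h ▸ List.mem_cons_self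
      · exact List.mem_cons_of_mem _
          ((List.dropWhile_sublist (l := rest) (p := fun d => d == c)).mem ((ih hdrop x).mp h))
    · intro hx
      rcases List.mem_cons.mp hx with h | h
      · exact h ▸ List.mem_cons_self
      · rcases (List.mem_append.mp (by
            rw [List.takeWhile_append_dropWhile (p := fun d => d == c) (l := rest)]; exact h)) with h1 | h1
        · have : x = c := by simpa using List.mem_takeWhile_imp h1
          exact this ▸ List.mem_cons_self
        · exact List.mem_cons_of_mem _ ((ih hdrop x).mpr h1)

theorem pv_pairwise_lt_pvKeys : ∀ (l : List Char), l.Pairwise (· ≤ ·) →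
    (pvKeys l).Pairwise (· < ·) := by
  intro l
  induction l using pvKeys.induct with
  | case1 => simp [pvKeys]
  | case2 c rest ih =>
    intro hp
    have hdrop : (rest.dropWhile (fun d => d == c)).Pairwise (· ≤ ·) :=
      hp.of_cons.sublist (List.dropWhile_sublist _)
    rw [pvKeys, List.pairwise_cons]
    refine ⟨fun x hx => ?_, ih hdrop⟩
    exact pv_lt_of_mem_dropWhile c rest hp.of_cons (fun y hy => (List.pairwise_cons.mp hp).1 y hy)
      x ((pv_mem_pvKeys _ hdrop x).mp hx)

theorem pv_runsB_eq : ∀ (l : List Char), l.Pairwise (· ≤ ·) →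
    pvRunsB l = (pvKeys l).map (fun u => (String.ofList [u], (l.count u : Int))) := by
  intro l
  induction l using pvKeys.induct with
  | case1 => simp [pvRunsB, pvKeys]
  | case2 c rest ih =>
    intro hp
    have hle : ∀ y ∈ rest, c ≤ y := (List.pairwise_cons.mp hp).1
    have hdrop : (rest.dropWhile (fun d => d == c)).Pairwise (· ≤ ·) :=
      hp.of_cons.sublist (List.dropWhile_sublist _)
    have hgt : ∀ x ∈ rest.dropWhile (fun d => d == c), c < x :=
      pv_lt_of_mem_dropWhile c rest hp.of_cons hle
    have hsplit : rest = rest.takeWhile (fun d => d == c) ++ rest.dropWhile (fun d => d == c) :=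
      (List.takeWhile_append_dropWhile).symm
    rw [pvRunsB, pvKeys, List.map_cons]
    congr 1
    · -- heads agree: count c (c :: rest) = 1 + length of the leading run
      have htake : (rest.takeWhile (fun d => d == c)).count c
          = (rest.takeWhile (fun d => d == c)).length := by
        apply List.count_eq_length.mpr
        intro y hy
        have : y = c := by simpa using List.mem_takeWhile_imp hy
        simp [this]
      have hdz : (rest.dropWhile (fun d => d == c)).count c = 0 := by
        apply List.count_eq_zero.mpr
        intro hmem
        exact absurd rfl (ne_of_lt (hgt c hmem)).symm
      have hcnt : (c :: rest).count c = (rest.takeWhile (fun d => d == c)).length + 1 := by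
        rw [List.count_cons_self]
        conv_lhs => rw [hsplit]
        rw [List.count_append, htake, hdz]
      simp only [Prod.mk.injEq, hcnt]
      refine ⟨trivial, by push_cast; ring⟩
    · -- tails agree, replacing each key's count over l by its count over the drop
      rw [ih hdrop]
      apply List.map_congr_left
      intro u hu
      have hcu : c < u := hgt u ((pv_mem_pvKeys _ hdrop u).mp hu)
      have htz : (rest.takeWhile (fun d => d == c)).count u = 0 := by
        apply List.count_eq_zero.mpr
        intro hmem
        have : u = c := by simpa using List.mem_takeWhile_imp hmem
        exact absurd this (ne_of_lt hcu).symm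
      have : (c :: rest).count u = (rest.dropWhile (fun d => d == c)).count u := by
        rw [List.count_cons_of_ne (ne_of_lt hcu)]
        conv_lhs => rw [hsplit]
        rw [List.count_append, htz, Nat.zero_add]
      rw [this]

-- A's per-group dict equals B's run list, for any char list cs
theorem pv_group_eq (cs : List Char) :
    (PySem.List.sorted (PySem.Set.ofList cs) (fun x => x)).map
      (fun u => (String.ofList [u], (PySem.Chars.count cs [u] : Int)))
      = pvRunsB (PySem.List.sorted cs (fun x => x)) := by
  have hp : (PySem.List.sorted cs (fun x => x)).Pairwise (· ≤ ·) :=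
    PySem.List.sorted_pairwise cs (fun x => x)
  have hperm : (PySem.List.sorted cs (fun x => x)).Perm cs := PySem.List.sorted_perm cs _ _
  have hkmem : ∀ x, x ∈ pvKeys (PySem.List.sorted cs (fun x => x)) ↔ x ∈ PySem.Set.ofList cs := by
    intro x
    rw [pv_mem_pvKeys _ hp x, PySem.Set.mem_ofList]
    exact ⟨fun h => hperm.mem_iff.mp h, fun h => hperm.mem_iff.mpr h⟩
  have hkeys : PySem.List.sorted (PySem.Set.ofList cs) (fun x => x)
      = pvKeys (PySem.List.sorted cs (fun x => x)) := by
    apply PySem.List.sorted_eq_of_perm_of_pairwise_lt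
    · exact ((List.perm_ext_iff_of_nodup
        ((pv_pairwise_lt_pvKeys _ hp).nodup) (PySem.Set.nodup_ofList cs)).mpr hkmem)
    · exact pv_pairwise_lt_pvKeys _ hp
  rw [hkeys, pv_runsB_eq _ hp]
  apply List.map_congr_left
  intro u _
  rw [pv_count_singleton, hperm.count_eq]

-- ===== VERDICT (by name: the statement is the Claim_ definition above) =====
theorem counts_for_each_response_spec : Claim_equal_counts_for_each_response := by
  intro gr _
  unfold Spec_counts_for_each_response counts_for_each_response counts_for_each_response_alt
  rw [PySem.List.foldl_congr_mem _ _
    (fun group_counts p => group_counts ++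
      [(PySem.List.sorted (PySem.Set.ofList (pvJoin p.2)) (fun x => x)).map
        (fun u => (String.ofList [u], (PySem.Chars.count (pvJoin p.2) [u] : Int)))]) _ ?_]
  · rw [PySem.List.foldl_append_singleton_eq_map]
    have := PySem.List.map_snd_enumerate gr 0
    calc (PySem.List.enumerate gr).map (fun p => (PySem.List.sorted (PySem.Set.ofList (pvJoin p.2)) (fun x => x)).map
          (fun u => (String.ofList [u], (PySem.Chars.count (pvJoin p.2) [u] : Int))))
        = ((PySem.List.enumerate gr).map (·.2)).map (fun g => (PySem.List.sorted (PySem.Set.ofList (pvJoin g)) (fun x => x)).map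
          (fun u => (String.ofList [u], (PySem.Chars.count (pvJoin g) [u] : Int)))) := by rw [List.map_map]; rfl
      _ = gr.map (fun g => pvRunsB (PySem.List.sorted (pvJoin g) (fun x => x))) := by
          rw [this]; exact List.map_congr_left (fun g _ => pv_group_eq (pvJoin g))
  · intro acc p hp
    rcases (PySem.List.mem_enumerate_iff gr 0 p).mp hp with ⟨k, hk, rfl⟩
    have h1 : ((0 : Int) + (k : Int)) = (k : Int) := by ring
    rw [h1, PySem.List.pyGetD_natCast]
    rw [List.getD_eq_getElem?_getD, List.getElem?_map, List.getElem?_eq_getElem hk]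
    simp only [Option.map_some, Option.getD_some]
    rw [PySem.Dict.items_foldl_insert_fresh _ _ _ _ (fun a _ => PySem.Dict.contains_empty _) ?nd]
    · rfl
    case nd =>
      apply List.Nodup.map
      · intro a b h
        simpa using congrArg String.toList h
      · exact (PySem.List.sorted_ofList_pairwise_lt (pvJoin gr[k])).nodup
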